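-- pv_equiv track=rewrite | github.com/miraclefish/WaveNet | visualization/utils.py | find_id_and_level
-- ===== SOURCE A (Python) =====
-- def find_id_and_level(id, level):
--     component = ""
--     for i in range(level):
--         if (id+1) % 2 == 0:
--             component = '->High' + component
--         else:
--             component = '->Low' + component
--         id = id // 2
--     return component
-- ===== SOURCE B (Python) =====
-- def find_id_and_level(id, level):
--     if level <= 0:
--         return ""
--     masked = id & ((1 << level) - 1)
--     bits = format(masked, '0{}b'.format(level))
--     return ''.join('->High' if c == '1' else '->Low' for c in bits)
-- ===== Notes on version B (the rewrite author's own statement) =====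
-- stated objective: faster
-- what changed: Replaces the bit-by-bit floor-division loop with quadratic string prepending by a single mask (id & ((1<<level)-1)), fixed-width binary formatting, and one left-to-right join pass over the digit string.
import Mathlib
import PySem

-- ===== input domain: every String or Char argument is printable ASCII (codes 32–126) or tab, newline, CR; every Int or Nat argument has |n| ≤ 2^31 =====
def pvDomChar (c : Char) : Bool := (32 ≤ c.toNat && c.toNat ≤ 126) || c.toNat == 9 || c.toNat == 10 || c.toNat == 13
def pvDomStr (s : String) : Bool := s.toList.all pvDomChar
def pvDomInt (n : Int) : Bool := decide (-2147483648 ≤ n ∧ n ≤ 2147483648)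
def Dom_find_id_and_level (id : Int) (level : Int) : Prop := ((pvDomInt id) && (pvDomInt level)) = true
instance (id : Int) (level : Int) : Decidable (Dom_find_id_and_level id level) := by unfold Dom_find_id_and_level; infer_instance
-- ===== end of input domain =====

-- B replaces A's bit-by-bit floor-division loop with prepends by one mask + fixed-width
-- binary formatting + a single mapping pass (objective: simpler).

-- ===== PORT A =====
-- for i in range(level): prepend '->High'/'->Low', id //= 2
def findLoopA : Nat → Int → String → String
  | 0, _, component => component
  | n + 1, id, component =>
    findLoopA n (PySem.Int.floordiv id 2)
      (if PySem.Int.mod (id + 1) 2 = 0 then "->High" ++ component else "->Low" ++ component)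

def find_id_and_level (id : Int) (level : Int) : String :=
  findLoopA level.toNat id ""

-- ===== PORT B =====
-- format(masked, '0{level}b'): exactly `level` binary digits of masked (< 2^level), MSB first;
-- ported by hand as a Bool list (true = digit '1'), exact on this domain since masked < 2^level.
def binDigits : Nat → Nat → List Bool
  | 0, _ => []
  | k + 1, m => binDigits k (m / 2) ++ [m % 2 == 1]

def find_id_and_level_alt (id : Int) (level : Int) : String :=
  if level ≤ 0 then ""
  else
    -- id & ((1 << level) - 1) : Python's bitwise-and with an all-ones mask = id mod 2^level (≥ 0)
    let masked : Nat := (id % ((2 : Int) ^ level.toNat)).toNat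
    String.join ((binDigits level.toNat masked).map
      (fun c => if c then "->High" else "->Low"))

-- ===== PRECONDITION & SPEC =====
def Spec_find_id_and_level (id : Int) (level : Int) (out : String) : Prop := out = find_id_and_level_alt id level
instance (id : Int) (level : Int) (out : String) : Decidable (Spec_find_id_and_level id level out) := by unfold Spec_find_id_and_level; infer_instance

-- ===== CLAIM (what is proved, stated in full; the proofs are below) =====
def Claim_equal_find_id_and_level : Prop := ∀ (id : Int) (level : Int), Dom_find_id_and_level id level → Spec_find_id_and_level id level (find_id_and_level id level)

-- ===== LEMMAS AND PROOFS =====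

-- A's per-step prefix string
def bitStr (id : Int) : String :=
  if PySem.Int.mod (id + 1) 2 = 0 then "->High" else "->Low"

theorem findLoopA_append (n : Nat) : ∀ (id : Int) (c : String),
    findLoopA n id c = findLoopA n id "" ++ c := by
  induction n with
  | zero => intro id c; simp [findLoopA]
  | succ k ih =>
    intro id c
    simp only [findLoopA]
    rw [ih _ (if PySem.Int.mod (id + 1) 2 = 0 then "->High" ++ c else "->Low" ++ c),
        ih _ (if PySem.Int.mod (id + 1) 2 = 0 then "->High" ++ "" else "->Low" ++ "")]
    split <;> simp [String.append_assoc]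

theorem emod_two_pow_succ (id : Int) (k : Nat) :
    id % ((2 : Int) ^ (k + 1)) = 2 * ((id / 2) % ((2 : Int) ^ k)) + id % 2 := by
  have h2 : (0:Int) < 2 ^ k := by positivity
  have e1 : id = 2 * (id / 2) + id % 2 := by omega
  have e2 : (id / 2) = 2 ^ k * ((id / 2) / 2 ^ k) + (id / 2) % 2 ^ k := by
    rw [Int.mul_ediv_add_emod]
  have hr1 : (0:Int) ≤ (id / 2) % 2 ^ k := Int.emod_nonneg _ (by positivity)
  have hr2 : (id / 2) % 2 ^ k < 2 ^ k := Int.emod_lt_of_pos _ h2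
  have hb1 : (0:Int) ≤ id % 2 := Int.emod_nonneg _ (by norm_num)
  have hb2 : id % 2 < 2 := Int.emod_lt_of_pos _ (by norm_num)
  have key : id = (2 ^ (k+1)) * ((id / 2) / 2 ^ k) + (2 * ((id / 2) % 2 ^ k) + id % 2) := by
    rw [pow_succ]; nlinarith [e1, e2]
  calc id % ((2:Int) ^ (k+1))
      = ((2 ^ (k+1)) * ((id / 2) / 2 ^ k) + (2 * ((id / 2) % 2 ^ k) + id % 2)) % (2 ^ (k+1)) := by
        rw [← key]
    _ = (2 * ((id / 2) % 2 ^ k) + id % 2) % (2 ^ (k+1)) := by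
        rw [Int.add_comm, Int.add_mul_emod_self_left]
    _ = 2 * ((id / 2) % 2 ^ k) + id % 2 := by
        apply Int.emod_eq_of_lt (by omega)
        rw [pow_succ]; omega

theorem findLoopA_eq (n : Nat) : ∀ (id : Int),
    findLoopA n id "" =
      String.join ((binDigits n ((id % ((2:Int) ^ n)).toNat)).map
        (fun c => if c then "->High" else "->Low")) := by
  induction n with
  | zero => intro id; simp [findLoopA, binDigits, String.join]
  | succ k ih =>
    intro id
    have hsplit := emod_two_pow_succ id k
    have h2 : (0:Int) < 2 ^ k := by positivity
    have hr1 : (0:Int) ≤ (id / 2) % 2 ^ k := Int.emod_nonneg _ (by positivity)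
    have hb1 : (0:Int) ≤ id % 2 := Int.emod_nonneg _ (by norm_num)
    have hb2 : id % 2 < 2 := Int.emod_lt_of_pos _ (by norm_num)
    -- the Nat-side digits of the masked value
    have hdiv : ((id % ((2:Int) ^ (k+1))).toNat) / 2 = ((id / 2) % ((2:Int) ^ k)).toNat := by
      omega
    have hmod : ((id % ((2:Int) ^ (k+1))).toNat) % 2 = (id % 2).toNat := by
      omega
    have hfd : PySem.Int.floordiv id 2 = id / 2 :=
      PySem.Int.floordiv_eq_ediv_of_pos (by norm_num)
    have hbit : (if PySem.Int.mod (id + 1) 2 = 0 then "->High" ++ ("" : String) else "->Low" ++ "")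
        = (if ((id % 2).toNat == 1) = true then "->High" else "->Low") := by
      have hm : PySem.Int.mod (id + 1) 2 = (id + 1) % 2 :=
        PySem.Int.mod_eq_emod_of_pos (by norm_num)
      rw [hm]
      by_cases h : id % 2 = 0
      · have h1 : (id + 1) % 2 = 1 := by omega
        have h2 : (id % 2).toNat = 0 := by omega
        simp [h1, h2]
      · have h1 : id % 2 = 1 := by omega
        have h2 : (id + 1) % 2 = 0 := by omega
        have h3 : (id % 2).toNat = 1 := by omega
        simp [h1, h2]
    simp only [findLoopA]
    rw [findLoopA_append, ih, hfd]
    simp only [binDigits, hdiv, hmod, List.map_append, List.map_cons, List.map_nil,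
      String.join, List.foldl_append, List.foldl_cons, List.foldl_nil]
    rw [hbit]

theorem find_id_and_level_spec : Claim_equal_find_id_and_level := by
  intro id level _
  unfold Spec_find_id_and_level find_id_and_level find_id_and_level_alt
  by_cases h : level ≤ 0
  · have : level.toNat = 0 := by omega
    simp [h, this, findLoopA]
  · simp only [h, if_false]
    exact findLoopA_eq level.toNat id
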